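-- pv_equiv track=rewrite | github.com/ayaanhossain/oligopool | oligopool/utils.py | get_constant_regions
-- ===== SOURCE A (Python) =====
-- def get_constant_regions(seqconstr):
--     '''
--     Extract all constant, non-degenerate
--     regions embedded in seqconstr.
--     Internal use only.
--
--     :: seqconstr
--        type - string
--        desc - element sequence constraint
--     '''
--
--     # Make a local copy
--     cseqconstr = str(seqconstr)
--
--     # Remove dgenerate nucleotides
--     for nt in set(seqconstr) - set('ATGC'):
--         cseqconstr = cseqconstr.replace(nt, '-')
--
--     # Split and extract defined regions
--     regions = set(cseqconstr.split('-'))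
--     if '' in regions:
--         regions.remove('')
--
--     # Return results
--     return regions
-- ===== SOURCE B (Python) =====
-- def get_constant_regions(seqconstr):
--     '''
--     Extract all constant, non-degenerate
--     regions embedded in seqconstr.
--     Single pass: accumulate ATGC runs in a
--     buffer and flush each run into the set.
--     '''
--     regions = set()
--     buf = []
--     for ch in str(seqconstr):
--         if ch in 'ATGC':
--             buf.append(ch)
--         elif buf:
--             regions.add(''.join(buf))
--             buf = []
--     if buf:
--         regions.add(''.join(buf))
--     return regions
-- ===== Notes on version B (the rewrite author's own statement) =====
-- stated objective: faster
-- what changed: Replaces the replace-each-degenerate-character loop (one full string rewrite per distinct non-ATGC character) plus split/dedup with a single scan that accumulates ATGC runs in a buffer and flushes each run into the result set.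
import Mathlib
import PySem

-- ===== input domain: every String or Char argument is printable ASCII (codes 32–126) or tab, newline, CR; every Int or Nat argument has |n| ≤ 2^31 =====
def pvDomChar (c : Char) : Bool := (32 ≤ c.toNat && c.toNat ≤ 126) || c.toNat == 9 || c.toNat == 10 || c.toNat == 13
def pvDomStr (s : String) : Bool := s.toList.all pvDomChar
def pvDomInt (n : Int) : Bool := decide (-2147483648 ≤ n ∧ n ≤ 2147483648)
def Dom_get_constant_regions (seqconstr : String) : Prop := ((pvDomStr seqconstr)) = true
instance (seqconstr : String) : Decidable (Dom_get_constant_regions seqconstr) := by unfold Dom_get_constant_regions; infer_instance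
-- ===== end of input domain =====

-- B replaces A's one-full-string-rewrite-per-degenerate-character loop plus split/dedup with a
-- single scan that accumulates ATGC runs and flushes them into the result set (objective: faster).

-- ===== PORT A =====
-- The Python loop iterates over a set (hash order); the result of replacing every such character
-- by '-' is independent of that order, so folding over PySem.Set.diff's list order is exact.
def get_constant_regions (seqconstr : String) : List String :=
  let cseqconstr := seqconstr  -- str(seqconstr): identity on a str
  let nts := PySem.Set.diff (PySem.Set.ofList seqconstr.toList) (PySem.Set.ofList "ATGC".toList)
  let cseq := nts.foldl (fun s nt => PySem.Str.replace s (String.ofList [nt]) "-") cseqconstr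
  let parts := (PySem.Str.split? cseq "-").getD []  -- sep "-" is nonempty: split? is never none
  let regions := PySem.Set.ofList parts
  if PySem.Set.contains regions "" then (PySem.Set.remove? regions "").getD regions
  else regions

-- ===== PORT B =====
-- 'ch in "ATGC"' on a single char ch is membership in the char list; ''.join(buf) of a char list
-- is String.ofList.
def get_constant_regions_alt (seqconstr : String) : List String :=
  let st := seqconstr.toList.foldl
    (fun (st : PySem.Set String × List Char) ch =>
      if ch ∈ "ATGC".toList then (st.1, st.2 ++ [ch])
      else if st.2 ≠ [] then (PySem.Set.add st.1 (String.ofList st.2), ([] : List Char))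
      else st)
    (PySem.Set.empty, ([] : List Char))
  if st.2 ≠ [] then PySem.Set.add st.1 (String.ofList st.2) else st.1

-- ===== PRECONDITION & SPEC =====
def Spec_get_constant_regions (seqconstr : String) (out : List String) : Prop := out = get_constant_regions_alt seqconstr
instance (seqconstr : String) (out : List String) : Decidable (Spec_get_constant_regions seqconstr out) := by unfold Spec_get_constant_regions; infer_instance

-- ===== CLAIM (what is proved, stated in full; the proofs are below) =====
def Claim_equal_get_constant_regions : Prop := ∀ (seqconstr : String), Dom_get_constant_regions seqconstr → Spec_get_constant_regions seqconstr (get_constant_regions seqconstr)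

-- ===== LEMMAS AND PROOFS =====

-- The pieces of l cut at non-ATGC characters (empty pieces included, exactly as split('-')
-- produces them); cur is the piece currently being accumulated.
def pvSegs (l : List Char) (cur : List Char) : List (List Char) :=
  match l with
  | [] => [cur]
  | c :: t => if c ∈ "ATGC".toList then pvSegs t (cur ++ [c]) else cur :: pvSegs t []

-- Reversed-accumulator splitter mirroring PySem.Chars.splitOn.go on a single-char separator.
def pvSplitCh (d : Char) (l : List Char) (cur : List Char) : List (List Char) :=
  match l with
  | [] => [cur.reverse]
  | c :: t => if c = d then cur.reverse :: pvSplitCh d t [] else pvSplitCh d t (c :: cur)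

theorem pvReplaceGoSingle (a b : Char) :
    ∀ (fuel : Nat) (l acc : List Char), l.length ≤ fuel →
      PySem.Chars.replace.go [a] [b] fuel l acc
        = acc.reverse ++ l.map (fun c => if c = a then b else c) := by
  intro fuel
  induction fuel with
  | zero =>
    intro l acc h
    have : l = [] := List.length_eq_zero_iff.mp (Nat.le_antisymm h (Nat.zero_le _))
    subst this; simp [PySem.Chars.replace.go]
  | succ n ih =>
    intro l acc h
    cases l with
    | nil => simp [PySem.Chars.replace.go]
    | cons c t =>
      simp only [PySem.Chars.replace.go, List.length_cons, List.length_nil,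
        List.drop_succ_cons, List.drop_zero]
      by_cases hca : c = a
      · subst hca
        have hp : [c].isPrefixOf (c :: t) = true := by simp [List.isPrefixOf]
        rw [if_pos hp]
        rw [ih t _ (by simpa using Nat.le_of_succ_le_succ h)]
        simp
      · have hp : [a].isPrefixOf (c :: t) = false := by
          simp only [List.isPrefixOf, Bool.and_eq_false_iff]
          left; simp [beq_eq_false_iff_ne]; exact fun h' => (hca h'.symm).elim
        rw [if_neg (by simp [hp])]
        rw [ih t _ (by simpa using Nat.le_of_succ_le_succ h)]
        simp [hca]

theorem pvReplaceSingle (a b : Char) (l : List Char) :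
    PySem.Chars.replace l [a] [b] = l.map (fun c => if c = a then b else c) := by
  simp only [PySem.Chars.replace]
  rw [if_neg (by simp)]
  simpa using pvReplaceGoSingle a b l.length l [] (Nat.le_refl _)

theorem pvFoldReplaceToList (ns : List Char) :
    ∀ (s : String),
      (ns.foldl (fun (s : String) nt => PySem.Str.replace s (String.ofList [nt]) "-") s).toList
        = ns.foldl (fun l nt => l.map (fun c => if c = nt then '-' else c)) s.toList := by
  induction ns with
  | nil => intro s; rfl
  | cons nt rest ih =>
    intro s
    simp only [List.foldl_cons]
    rw [ih]
    congr 1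
    have h1 : (PySem.Str.replace s (String.ofList [nt]) "-").toList
        = PySem.Chars.replace s.toList [nt] ['-'] := by
      simp [PySem.Str.replace]
    rw [h1, pvReplaceSingle]

theorem pvFoldMapMask (ns : List Char) :
    ∀ (l : List Char),
      ns.foldl (fun l nt => l.map (fun c => if c = nt then '-' else c)) l
        = l.map (fun c => if c ∈ ns then '-' else c) := by
  induction ns with
  | nil => intro l; simp
  | cons nt rest ih =>
    intro l
    simp only [List.foldl_cons]
    rw [ih, List.map_map]
    apply List.map_congr_left
    intro c _
    by_cases h1 : c = nt
    · subst h1; by_cases h2 : '-' ∈ rest <;> simp [h2]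
    · by_cases h2 : c ∈ rest <;> simp [h1, h2]

theorem pvSplitOnGoSingle (d : Char) :
    ∀ (fuel : Nat) (l cur : List Char) (acc : List (List Char)), l.length < fuel →
      PySem.Chars.splitOn.go [d] fuel l cur acc = acc.reverse ++ pvSplitCh d l cur := by
  intro fuel
  induction fuel with
  | zero => intro l cur acc h; omega
  | succ n ih =>
    intro l cur acc h
    cases l with
    | nil => simp [PySem.Chars.splitOn.go, pvSplitCh]
    | cons c t =>
      simp only [PySem.Chars.splitOn.go, List.length_cons, List.length_nil,
        List.drop_succ_cons, List.drop_zero]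
      by_cases hcd : c = d
      · subst hcd
        have hp : [c].isPrefixOf (c :: t) = true := by simp [List.isPrefixOf]
        rw [if_pos hp]
        rw [ih t [] _ (by simpa using Nat.lt_of_succ_lt_succ h)]
        simp [pvSplitCh]
      · have hp : [d].isPrefixOf (c :: t) = false := by
          simp only [List.isPrefixOf, Bool.and_eq_false_iff]
          left; simp [beq_eq_false_iff_ne]; exact fun h' => (hcd h'.symm).elim
        rw [if_neg (by simp [hp])]
        rw [ih t (c :: cur) acc (by simpa using Nat.lt_of_succ_lt_succ h)]
        rw [pvSplitCh, if_neg hcd]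

theorem pvSplitOnSingle (d : Char) (l : List Char) :
    PySem.Chars.splitOn l [d] = pvSplitCh d l [] := by
  simp only [PySem.Chars.splitOn]
  simpa using pvSplitOnGoSingle d (l.length + 1) l [] [] (Nat.lt_succ_self _)

-- splitting the masked list at '-' is collecting the ATGC runs
theorem pvSplitMaskSegs :
    ∀ (l cur : List Char),
      pvSplitCh '-' (l.map (fun c => if c ∈ "ATGC".toList then c else '-')) cur
        = pvSegs l cur.reverse := by
  intro l
  induction l with
  | nil => intro cur; simp [pvSplitCh, pvSegs]
  | cons c t ih =>
    intro cur
    by_cases h : c ∈ "ATGC".toList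
    · have hcd : c ≠ '-' := by
        intro e; subst e; exact absurd h (by decide)
      rw [List.map_cons, if_pos h, pvSplitCh, if_neg hcd, ih, pvSegs, if_pos h]
      simp
    · rw [List.map_cons, if_neg h, pvSplitCh, if_pos rfl, ih, pvSegs, if_neg h]
      simp

theorem pvFinalizeEqDiscard (r : PySem.Set String) :
    (if PySem.Set.contains r "" then (PySem.Set.remove? r "").getD r else r)
      = PySem.Set.discard r "" := by
  by_cases h : "" ∈ r
  · simp [PySem.Set.remove?, h]
  · rw [if_neg (by simp [h])]
    symm
    apply List.filter_eq_self.mpr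
    intro y hy
    simp only [Bool.not_eq_eq_eq_not, Bool.not_true, beq_eq_false_iff_ne]
    exact fun e => h (e ▸ hy)

theorem pvDiscardAdd (r : PySem.Set String) (x : String) :
    PySem.Set.discard (PySem.Set.add r x) ""
      = if x = "" then PySem.Set.discard r "" else PySem.Set.add (PySem.Set.discard r "") x := by
  by_cases hx : x = ""
  · subst hx
    rw [if_pos rfl]
    simp only [PySem.Set.add, PySem.Set.discard]
    by_cases h : "" ∈ r
    · simp [h]
    · simp [h, List.filter_append]
  · rw [if_neg hx]
    simp only [PySem.Set.add, PySem.Set.discard]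
    by_cases h : x ∈ r
    · rw [if_pos (by simp [h])]
      rw [if_pos (by simp [List.mem_filter, h, hx])]
    · rw [if_neg (by simp [h])]
      rw [if_neg (by simp [List.mem_filter, h])]
      simp [List.filter_append, hx]

theorem pvDiscardFoldAdd :
    ∀ (ss : List String) (r : PySem.Set String),
      PySem.Set.discard (ss.foldl PySem.Set.add r) ""
        = ss.foldl (fun r s => if s = "" then r else PySem.Set.add r s) (PySem.Set.discard r "") := by
  intro ss
  induction ss with
  | nil => intro r; rfl
  | cons s t ih =>
    intro r
    simp only [List.foldl_cons]
    rw [ih, pvDiscardAdd]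

theorem pvOfListEqEmpty (seg : List Char) : (String.ofList seg = "") ↔ seg = [] := by
  constructor
  · intro h
    have := congrArg String.toList h
    simpa using this
  · intro h; subst h; rfl

theorem pvBFold :
    ∀ (l : List Char) (r : PySem.Set String) (buf : List Char),
      (let st := l.foldl
          (fun (st : PySem.Set String × List Char) ch =>
            if ch ∈ "ATGC".toList then (st.1, st.2 ++ [ch])
            else if st.2 ≠ [] then (PySem.Set.add st.1 (String.ofList st.2), ([] : List Char))
            else st)
          (r, buf)
        if st.2 ≠ [] then PySem.Set.add st.1 (String.ofList st.2) else st.1)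
        = (pvSegs l buf).foldl
            (fun r seg => if seg = [] then r else PySem.Set.add r (String.ofList seg)) r := by
  intro l
  induction l with
  | nil =>
    intro r buf
    by_cases h : buf = [] <;> simp [pvSegs, h]
  | cons c t ih =>
    intro r buf
    by_cases h : c ∈ "ATGC".toList
    · simp only [List.foldl_cons, pvSegs]
      rw [if_pos h, if_pos h]
      exact ih r (buf ++ [c])
    · simp only [List.foldl_cons, pvSegs]
      rw [if_neg h, if_neg h]
      by_cases hb : buf = []
      · subst hb
        have e1 : (if ([] : List Char) ≠ [] then (PySem.Set.add r (String.ofList []), ([] : List Char)) else (r, ([] : List Char))) = (r, ([] : List Char)) := by simp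
        rw [e1, List.foldl_cons]
        have e2 : (if ([] : List Char) = [] then r else PySem.Set.add r (String.ofList [])) = r := by simp
        rw [e2]
        exact ih r []
      · have e1 : (if buf ≠ [] then (PySem.Set.add r (String.ofList buf), ([] : List Char)) else (r, buf)) = (PySem.Set.add r (String.ofList buf), ([] : List Char)) := if_pos hb
        rw [e1, List.foldl_cons]
        have e2 : (if buf = [] then r else PySem.Set.add r (String.ofList buf)) = PySem.Set.add r (String.ofList buf) := if_neg hb
        rw [e2]
        exact ih _ []

theorem pvAltEq (s : String) :
    get_constant_regions_alt s
      = (pvSegs s.toList []).foldl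
          (fun r seg => if seg = [] then r else PySem.Set.add r (String.ofList seg))
          PySem.Set.empty := by
  rw [get_constant_regions_alt]
  exact pvBFold s.toList PySem.Set.empty []

theorem pvSplitDash (s : String) :
    PySem.Str.split? s "-" = some ((PySem.Chars.splitOn s.toList ['-']).map String.ofList) := by
  have h : ("-" : String).toList = ['-'] := by decide
  simp [PySem.Str.split?, PySem.Chars.split?, h]

theorem pvAEq (s : String) :
    get_constant_regions s
      = (pvSegs s.toList []).foldl
          (fun r seg => if seg = [] then r else PySem.Set.add r (String.ofList seg))
          PySem.Set.empty := by
  rw [get_constant_regions]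
  rw [pvSplitDash]
  simp only [Option.getD_some]
  have hrep : ((PySem.Set.diff (PySem.Set.ofList s.toList) (PySem.Set.ofList "ATGC".toList)).foldl
        (fun s nt => PySem.Str.replace s (String.ofList [nt]) "-") s).toList
      = s.toList.map (fun c => if c ∈ "ATGC".toList then c else '-') := by
    rw [pvFoldReplaceToList, pvFoldMapMask]
    apply List.map_congr_left
    intro c hc
    by_cases ha : c ∈ "ATGC".toList
    · rw [if_neg (by
        intro hmem
        have := (PySem.Set.mem_diff _ _ _).mp hmem
        exact this.2 ((PySem.Set.mem_ofList _ _).mpr ha)), if_pos ha]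
    · rw [if_pos (by
        exact (PySem.Set.mem_diff _ _ _).mpr
          ⟨(PySem.Set.mem_ofList _ _).mpr hc, fun hm => ha ((PySem.Set.mem_ofList _ _).mp hm)⟩),
        if_neg ha]
  rw [hrep, pvSplitOnSingle, pvSplitMaskSegs]
  simp only [List.reverse_nil]
  rw [pvFinalizeEqDiscard]
  simp only [PySem.Set.ofList]
  rw [pvDiscardFoldAdd]
  have hempty : PySem.Set.discard PySem.Set.empty "" = PySem.Set.empty := rfl
  rw [hempty, List.foldl_map]
  have hfun : (fun (r : PySem.Set String) (seg : List Char) =>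
        if String.ofList seg = "" then r else PySem.Set.add r (String.ofList seg))
      = (fun (r : PySem.Set String) (seg : List Char) =>
        if seg = [] then r else PySem.Set.add r (String.ofList seg)) := by
    funext r seg
    by_cases h : seg = []
    · subst h
      rw [if_pos (by decide : String.ofList [] = ""), if_pos rfl]
    · rw [if_neg ((not_congr (pvOfListEqEmpty seg)).mpr h), if_neg h]
  rw [hfun]

-- ===== VERDICT (by name: the statement is the Claim_ definition above) =====
theorem get_constant_regions_spec : Claim_equal_get_constant_regions := by
  intro s _
  show get_constant_regions s = get_constant_regions_alt s
  rw [pvAEq, pvAltEq]
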